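-- pv_equiv track=rewrite | github.com/zqq66/DeepGlycan | ion_indexed_open_search.py | _trypsin_cleavage_sites
-- ===== SOURCE A (Python) =====
-- from typing import Dict, Iterable, List, Sequence, Tuple
--
-- def _trypsin_cleavage_sites(sequence: str) -> List[int]:
--     sites = [0]
--     for idx, residue in enumerate(sequence):
--         if residue in ("K", "R"):
--             next_residue = sequence[idx + 1] if idx + 1 < len(sequence) else None
--             if next_residue != "P":
--                 sites.append(idx + 1)
--     if sites[-1] != len(sequence):
--         sites.append(len(sequence))
--     return sites
-- ===== SOURCE B (Python) =====
-- from typing import List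
--
--
-- def _trypsin_cleavage_sites(sequence: str) -> List[int]:
--     # Digest by string rewriting: insert a cut marker after every K/R, cancel
--     # markers that precede a proline by merging fragments, then read the sites
--     # off as the running lengths (prefix sums) of the resulting fragments.
--     CUT = "\x00"  # marker; peptide strings are printable ASCII, so it never collides
--     marked = sequence.replace("K", "K" + CUT).replace("R", "R" + CUT)
--     raw = marked.split(CUT)
--     fragments = [raw[0]]
--     for frag in raw[1:]:
--         if frag.startswith("P"):
--             fragments[-1] += frag
--         else:
--             fragments.append(frag)
--     if fragments[-1] == "":
--         fragments.pop()
--     sites = [0]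
--     for frag in fragments:
--         sites.append(sites[-1] + len(frag))
--     return sites
-- ===== Notes on version B (the rewrite author's own statement) =====
-- stated objective: alternative
-- what changed: Replaces the indexed scan with per-position lookahead by a string-rewriting digest: insert a cut marker after every K/R via str.replace, split on the marker, merge back fragments that start with P (proline suppression), and read the cleavage sites off as prefix sums of the fragment lengths.
import Mathlib
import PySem

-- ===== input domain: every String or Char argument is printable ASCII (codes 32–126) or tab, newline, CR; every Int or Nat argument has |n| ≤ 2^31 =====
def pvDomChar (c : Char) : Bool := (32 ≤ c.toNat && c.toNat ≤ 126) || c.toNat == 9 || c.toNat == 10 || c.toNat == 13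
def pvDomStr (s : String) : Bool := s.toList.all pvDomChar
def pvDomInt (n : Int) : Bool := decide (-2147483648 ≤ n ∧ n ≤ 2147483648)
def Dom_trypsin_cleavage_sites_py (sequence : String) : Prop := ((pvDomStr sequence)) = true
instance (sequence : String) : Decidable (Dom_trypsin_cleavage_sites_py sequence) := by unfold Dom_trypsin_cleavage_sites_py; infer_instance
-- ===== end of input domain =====

-- B replaces A's indexed lookahead scan by a string-rewriting digest (insert a cut marker
-- after every K/R with str.replace, split on it, merge proline-led fragments back, prefix-sum
-- the fragment lengths); objective: alternative algorithm, same cost.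

-- ===== PORT A =====
-- loop body of A's `for idx, residue in enumerate(sequence):`
def pvBodyA (cs : List Char) (sites : List Int) (p : Int × Char) : List Int :=
  if p.2 = 'K' ∨ p.2 = 'R' then
    let next_residue : Option Char :=
      if p.1 + 1 < (cs.length : Int) then some (PySem.List.pyGetD cs (p.1 + 1) ' ') else none
    if next_residue ≠ some 'P' then sites ++ [p.1 + 1] else sites
  else sites

def trypsin_cleavage_sites_py (sequence : String) : List Int :=
  let cs := sequence.toList
  let sites : List Int := [0]
  let sites := (PySem.List.enumerate cs).foldl (pvBodyA cs) sites
  if sites.getLast! ≠ (cs.length : Int) then sites ++ [(cs.length : Int)] else sites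

-- ===== PORT B =====
def pvCut : Char := Char.ofNat 0   -- Source B's CUT = "\x00"

-- body of Source B's merge loop `for frag in raw[1:]:` (fragments[-1] += frag / append)
def pvMergeStep (fs : List (List Char)) (frag : List Char) : List (List Char) :=
  if PySem.Chars.startswith frag ['P'] then fs.dropLast ++ [fs.getLast! ++ frag] else fs ++ [frag]

-- body of Source B's `for frag in fragments: sites.append(sites[-1] + len(frag))`
def pvSumStep (ss : List Int) (frag : List Char) : List Int :=
  ss ++ [ss.getLast! + (frag.length : Int)]

def trypsin_cleavage_sites_py_alt (sequence : String) : List Int :=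
  let cs := sequence.toList
  let marked := PySem.Chars.replace (PySem.Chars.replace cs ['K'] ['K', pvCut]) ['R'] ['R', pvCut]
  let raw := PySem.Chars.splitOn marked [pvCut]
  let fragments := (raw.drop 1).foldl pvMergeStep [raw.headI]
  let fragments := if fragments.getLast! = [] then fragments.dropLast else fragments
  fragments.foldl pvSumStep [0]

-- ===== PRECONDITION & SPEC =====
def Spec_trypsin_cleavage_sites_py (sequence : String) (out : List Int) : Prop := out = trypsin_cleavage_sites_py_alt sequence
instance (sequence : String) (out : List Int) : Decidable (Spec_trypsin_cleavage_sites_py sequence out) := by unfold Spec_trypsin_cleavage_sites_py; infer_instance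

-- ===== CLAIM (what is proved, stated in full; the proofs are below) =====
def Claim_equal_trypsin_cleavage_sites_py : Prop := ∀ (sequence : String), Dom_trypsin_cleavage_sites_py sequence → Spec_trypsin_cleavage_sites_py sequence (trypsin_cleavage_sites_py sequence)

-- ===== LEMMAS AND PROOFS =====

-- common specification: cleavage positions of cs starting at absolute index i,
-- with `nxt` the character (if any) that follows the end of cs
def pvFwd : List Char → Int → Option Char → List Int
  | [], _, _ => []
  | c :: rest, i, nxt =>
    (if (c = 'K' ∨ c = 'R') ∧ (match rest with | [] => nxt | d :: _ => some d) ≠ some 'P'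
     then [i + 1] else []) ++ pvFwd rest (i + 1) nxt

-- ---- A-side: the enumerate loop computes pvFwd ----
lemma loopA (cs : List Char) : ∀ (suf pre : List Char), cs = pre ++ suf → ∀ (acc : List Int),
    (PySem.List.enumerate suf (pre.length : Int)).foldl (pvBodyA cs) acc
      = acc ++ pvFwd suf (pre.length : Int) none := by
  intro suf
  induction suf with
  | nil => intro pre h acc; simp [pvFwd, PySem.List.enumerate_nil]
  | cons c rest ih =>
    intro pre h acc
    rw [PySem.List.enumerate_cons, List.foldl_cons]
    have hpre' : cs = (pre ++ [c]) ++ rest := by simp [h]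
    have hstep := ih (pre ++ [c]) hpre' (pvBodyA cs acc ((pre.length : Int), c))
    have hlen' : (((pre ++ [c]).length : Int)) = (pre.length : Int) + 1 := by
      simp [List.length_append]
    rw [hlen'] at hstep
    rw [hstep]
    have hbody : pvBodyA cs acc ((pre.length : Int), c)
        = acc ++ (if (c = 'K' ∨ c = 'R') ∧ (match rest with | [] => (none : Option Char) | d :: _ => some d) ≠ some 'P'
                  then [(pre.length : Int) + 1] else []) := by
      cases rest with
      | nil =>
        have hlt : ¬ ((pre.length : Int) + 1 < (cs.length : Int)) := by
          subst h; simp only [List.length_append, List.length_cons, List.length_nil]; push_cast; omega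
        simp only [pvBodyA, if_neg hlt]
        by_cases hc : c = 'K' ∨ c = 'R' <;> simp [hc]
      | cons d rs =>
        have hlt : ((pre.length : Int) + 1 < (cs.length : Int)) := by
          subst h; simp only [List.length_append, List.length_cons]; push_cast; omega
        have hget : PySem.List.pyGetD cs ((pre.length : Int) + 1) ' ' = d := by
          have h0 : (0 : Int) ≤ (pre.length : Int) + 1 := by omega
          rw [PySem.List.pyGetD_eq_getElem cs ' ' h0 hlt]
          have hnat : ((pre.length : Int) + 1).toNat = pre.length + 1 := by omega
          subst h
          simp [hnat, List.getElem_append_right]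
        simp only [pvBodyA, if_pos hlt, hget]
        by_cases hc : c = 'K' ∨ c = 'R'
        · by_cases hd : d = 'P' <;> simp [hc, hd]
        · simp [hc]
    rw [hbody]
    simp only [pvFwd]
    simp only [List.append_assoc]
    cases rest <;> rfl

-- ---- B-side toolbox ----

-- single-character split, as a natural recursion
def pvSplitC (m : Char) : List Char → List (List Char)
  | [] => [[]]
  | c :: t => if c = m then [] :: pvSplitC m t else (pvSplitC m t).modifyHead (c :: ·)

lemma pvSplitC_ne_nil (m : Char) (l : List Char) : pvSplitC m l ≠ [] := by
  induction l with
  | nil => simp [pvSplitC]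
  | cons c t ih =>
    simp only [pvSplitC]
    split_ifs
    · simp
    · cases h : pvSplitC m t with
      | nil => exact absurd h ih
      | cons a r => simp [h]

-- replace by a single-character pattern is a flatMap
lemma replace_go_single (k : Char) (new : List Char) :
    ∀ (l : List Char) (fuel : Nat) (acc : List Char), l.length ≤ fuel →
    PySem.Chars.replace.go [k] new fuel l acc
      = acc.reverse ++ l.flatMap (fun c => if c = k then new else [c]) := by
  intro l
  induction l with
  | nil =>
    intro fuel acc _
    cases fuel <;> simp [PySem.Chars.replace.go]
  | cons c t ih =>
    intro fuel acc hf
    cases fuel with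
    | zero => simp at hf
    | succ m =>
      have hm : t.length ≤ m := by simpa using hf
      by_cases hck : c = k
      · have hpre : [k].isPrefixOf (c :: t) = true := by simp [List.isPrefixOf, hck]
        simp only [PySem.Chars.replace.go, hpre, if_pos]
        rw [show List.drop [k].length (c :: t) = t by simp]
        rw [ih m (new.reverse ++ acc) hm]
        simp [hck]
      · have hpre : [k].isPrefixOf (c :: t) = false := by
          simp [List.isPrefixOf]; exact fun h => absurd h.symm hck
        simp only [PySem.Chars.replace.go, hpre]
        rw [if_neg (by simp)]
        rw [ih m (c :: acc) hm]
        simp [hck]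

lemma replace_single (k : Char) (new : List Char) (l : List Char) :
    PySem.Chars.replace l [k] new = l.flatMap (fun c => if c = k then new else [c]) := by
  have := replace_go_single k new l l.length [] le_rfl
  simpa [PySem.Chars.replace] using this

-- splitOn with a single-character separator is pvSplitC
lemma splitOn_go_single (m : Char) :
    ∀ (l : List Char) (fuel : Nat) (cur : List Char) (acc : List (List Char)), l.length ≤ fuel →
    PySem.Chars.splitOn.go [m] fuel l cur acc
      = acc.reverse ++ (pvSplitC m l).modifyHead (cur.reverse ++ ·) := by
  intro l
  induction l with
  | nil =>
    intro fuel cur acc _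
    cases fuel <;> simp [PySem.Chars.splitOn.go, pvSplitC]
  | cons c t ih =>
    intro fuel cur acc hf
    cases fuel with
    | zero => simp at hf
    | succ n =>
      have hn : t.length ≤ n := by simpa using hf
      by_cases hcm : c = m
      · have hpre : [m].isPrefixOf (c :: t) = true := by simp [List.isPrefixOf, hcm]
        simp only [PySem.Chars.splitOn.go, hpre, if_pos]
        rw [show List.drop [m].length (c :: t) = t by simp]
        rw [ih n [] (cur.reverse :: acc) hn]
        simp only [pvSplitC, hcm, if_pos rfl]
        cases h : pvSplitC m t <;> simp [h]
      · have hpre : [m].isPrefixOf (c :: t) = false := by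
          simp [List.isPrefixOf]; exact fun h => absurd h.symm hcm
        simp only [PySem.Chars.splitOn.go, hpre]
        rw [if_neg (by simp)]
        rw [ih n (c :: cur) acc hn]
        cases h : pvSplitC m t with
        | nil => exact absurd h (pvSplitC_ne_nil m t)
        | cons a r => simp [pvSplitC, hcm, h]

lemma splitOn_single (m : Char) (l : List Char) :
    PySem.Chars.splitOn l [m] = pvSplitC m l := by
  have h0 : PySem.Chars.splitOn l [m] = PySem.Chars.splitOn.go [m] (l.length + 1) l [] [] := rfl
  rw [h0, splitOn_go_single m l (l.length + 1) [] [] (by omega)]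
  cases h : pvSplitC m l with
  | nil => exact absurd h (pvSplitC_ne_nil m l)
  | cons a r => simp

-- the marking pass: both replaces together
def pvMark1 (c : Char) : List Char :=
  if c = 'K' then ['K', pvCut] else if c = 'R' then ['R', pvCut] else [c]

lemma marked_eq (cs : List Char) :
    PySem.Chars.replace (PySem.Chars.replace cs ['K'] ['K', pvCut]) ['R'] ['R', pvCut]
      = cs.flatMap pvMark1 := by
  rw [replace_single, replace_single]
  induction cs with
  | nil => simp
  | cons c t ih =>
    simp only [List.flatMap_cons, List.flatMap_append, ih]
    congr 1
    by_cases hk : c = 'K'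
    · subst hk; simp [pvMark1, show pvCut ≠ 'R' by decide]
    · by_cases hr : c = 'R'
      · subst hr; simp [pvMark1, show pvCut ≠ 'R' by decide]
      · simp [pvMark1, hk, hr]

-- raw fragments of the marked string, as a recursion on cs
def pvRaw : List Char → List (List Char)
  | [] => [[]]
  | c :: t => if c = 'K' ∨ c = 'R' then [c] :: pvRaw t else (pvRaw t).modifyHead (c :: ·)

lemma pvRaw_ne_nil (cs : List Char) : pvRaw cs ≠ [] := by
  induction cs with
  | nil => simp [pvRaw]
  | cons c t ih =>
    simp only [pvRaw]
    split_ifs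
    · simp
    · cases h : pvRaw t with
      | nil => exact absurd h ih
      | cons a r => simp [h]

lemma splitC_marked (cs : List Char) (hdom : ∀ c ∈ cs, c ≠ pvCut) :
    pvSplitC pvCut (cs.flatMap pvMark1) = pvRaw cs := by
  induction cs with
  | nil => simp [pvSplitC, pvRaw]
  | cons c t ih =>
    have hc : c ≠ pvCut := hdom c (by simp)
    have ih' := ih (fun d hd => hdom d (by simp [hd]))
    simp only [List.flatMap_cons]
    by_cases hk : c = 'K'
    · subst hk
      simp [pvMark1, pvSplitC, pvRaw, ih', show ('K' : Char) ≠ pvCut by decide]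
    · by_cases hr : c = 'R'
      · subst hr
        simp [pvMark1, pvSplitC, pvRaw, ih', show ('R' : Char) ≠ pvCut by decide,
          show ('R' : Char) ≠ 'K' by decide]
      · simp [pvMark1, pvSplitC, pvRaw, ih', hk, hr, hc]

-- merge recursion equivalent to the foldl merge loop
def pvMergeRec : List Char → List (List Char) → List (List Char)
  | x, [] => [x]
  | x, y :: t => if PySem.Chars.startswith y ['P'] then pvMergeRec (x ++ y) t else x :: pvMergeRec y t

lemma foldl_mergeStep (r : List (List Char)) :
    ∀ (acc : List (List Char)) (x : List Char),
    r.foldl pvMergeStep (acc ++ [x]) = acc ++ pvMergeRec x r := by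
  induction r with
  | nil => intro acc x; simp [pvMergeRec]
  | cons y t ih =>
    intro acc x
    rw [List.foldl_cons]
    by_cases hp : PySem.Chars.startswith y ['P']
    · have hstep : pvMergeStep (acc ++ [x]) y = acc ++ [x ++ y] := by
        simp [pvMergeStep, hp, List.getLast!_eq_getLast?_getD, List.getLast?_concat]
      rw [hstep, ih acc (x ++ y)]
      simp [pvMergeRec, hp]
    · have hstep : pvMergeStep (acc ++ [x]) y = (acc ++ [x]) ++ [y] := by
        simp [pvMergeStep, hp]
      rw [hstep, ih (acc ++ [x]) y]
      simp [pvMergeRec, hp]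

-- the merged fragments, as a single recursion on cs with the open fragment x
def pvF : List Char → List Char → List (List Char)
  | x, [] => [x]
  | x, c :: t =>
    if (c = 'K' ∨ c = 'R') ∧ t.head? ≠ some 'P' then (x ++ [c]) :: pvF [] t
    else pvF (x ++ [c]) t

lemma pvF_cons (x : List Char) (c : Char) (t : List Char) :
    pvF x (c :: t)
      = if (c = 'K' ∨ c = 'R') ∧ t.head? ≠ some 'P' then (x ++ [c]) :: pvF [] t
        else pvF (x ++ [c]) t := rfl

lemma pvMergeRec_cons (x y : List Char) (t : List (List Char)) :
    pvMergeRec x (y :: t)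
      = if PySem.Chars.startswith y ['P'] then pvMergeRec (x ++ y) t
        else x :: pvMergeRec y t := rfl

lemma pvF_ne_nil (x cs : List Char) : pvF x cs ≠ [] := by
  induction cs generalizing x with
  | nil => simp [pvF]
  | cons c t ih =>
    simp only [pvF]
    split_ifs
    · simp
    · exact ih _

lemma pvRaw_headI_head (d : Char) (t : List Char) :
    ∃ z, (pvRaw (d :: t)).headI = d :: z := by
  simp only [pvRaw]
  split_ifs
  · exact ⟨[], rfl⟩
  · cases h : pvRaw t with
    | nil => exact absurd h (pvRaw_ne_nil t)
    | cons a r => exact ⟨a, by simp [h]⟩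

lemma mergeRec_raw (cs : List Char) :
    ∀ (x : List Char), pvMergeRec (x ++ (pvRaw cs).headI) (pvRaw cs).tail = pvF x cs := by
  induction cs with
  | nil => intro x; simp [pvRaw, pvMergeRec, pvF]
  | cons c t ih =>
    intro x
    by_cases hkr : c = 'K' ∨ c = 'R'
    · rw [show pvRaw (c :: t) = [c] :: pvRaw t from by simp [pvRaw, hkr]]
      simp only [List.headI_cons, List.tail_cons]
      cases t with
      | nil =>
        rw [show pvRaw ([] : List Char) = [[]] from rfl]
        rw [pvMergeRec_cons]
        rw [if_neg (show ¬ PySem.Chars.startswith [] ['P'] = true from by decide)]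
        rw [pvF_cons, if_pos ⟨hkr, by simp⟩]
        simp [pvMergeRec, pvF]
      | cons d t' =>
        obtain ⟨z, hz⟩ := pvRaw_headI_head d t'
        cases hraw : pvRaw (d :: t') with
        | nil => exact absurd hraw (pvRaw_ne_nil _)
        | cons h0 r0 =>
          have hh0 : h0 = d :: z := by rw [hraw] at hz; simpa using hz
          have hsw : PySem.Chars.startswith h0 ['P'] = decide (d = 'P') := by
            subst hh0
            by_cases hd : d = 'P'
            · subst hd; simp [PySem.Chars.startswith, List.isPrefixOf]
            · simp [PySem.Chars.startswith, List.isPrefixOf, hd,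
                show ('P' : Char) ≠ d from fun h => hd h.symm]
          rw [pvMergeRec_cons, hsw]
          by_cases hdP : d = 'P'
          · rw [if_pos (by simp [hdP])]
            have hih := ih (x ++ [c])
            rw [hraw] at hih
            simp only [List.headI_cons, List.tail_cons, ← List.append_assoc] at hih
            rw [hih]
            rw [pvF_cons x c (d :: t'), if_neg (by simp [hdP])]
          · rw [if_neg (by simp [hdP])]
            have hih := ih ([] : List Char)
            rw [hraw] at hih
            simp only [List.headI_cons, List.tail_cons, List.nil_append] at hih
            rw [hih]
            rw [pvF_cons x c (d :: t'), if_pos ⟨hkr, by simp [hdP]⟩]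
    · cases hraw : pvRaw t with
      | nil => exact absurd hraw (pvRaw_ne_nil _)
      | cons h0 r0 =>
        rw [show pvRaw (c :: t) = (c :: h0) :: r0 from by simp [pvRaw, hkr, hraw]]
        simp only [List.headI_cons, List.tail_cons]
        have hih := ih (x ++ [c])
        rw [hraw] at hih
        simp only [List.headI_cons, List.tail_cons] at hih
        rw [List.append_assoc] at hih
        rw [show x ++ c :: h0 = x ++ ([c] ++ h0) from by simp]
        rw [hih]
        rw [pvF_cons, if_neg (by simp [hkr])]

-- prefix sums
def pvPS : Int → List Int → List Int
  | _, [] => []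
  | a, l :: t => (a + l) :: pvPS (a + l) t

lemma pvPS_eq_nil_iff (a : Int) (L : List Int) : pvPS a L = [] ↔ L = [] := by
  cases L <;> simp [pvPS]

lemma pvPS_append (a : Int) (L1 L2 : List Int) :
    pvPS a (L1 ++ L2) = pvPS a L1 ++ pvPS (a + L1.sum) L2 := by
  induction L1 generalizing a with
  | nil => simp [pvPS]
  | cons l t ih => simp [pvPS, ih, add_assoc]

lemma pvPS_getLast? (L : List Int) : ∀ (a : Int), L ≠ [] →
    (pvPS a L).getLast? = some (a + L.sum) := by
  induction L with
  | nil => intro a h; simp at h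
  | cons l t ih =>
    intro a _
    cases t with
    | nil => simp [pvPS]
    | cons l' t' =>
      rw [pvPS, pvPS, List.getLast?_cons_cons, ← pvPS]
      rw [ih (a + l) (by simp)]
      simp [add_assoc]

lemma foldl_sumStep (F : List (List Char)) :
    ∀ (acc : List Int) (a : Int),
    F.foldl pvSumStep (acc ++ [a]) = acc ++ [a] ++ pvPS a (F.map (fun f => (f.length : Int))) := by
  induction F with
  | nil => intro acc a; simp [pvPS]
  | cons f t ih =>
    intro acc a
    rw [List.foldl_cons]
    have hstep : pvSumStep (acc ++ [a]) f = (acc ++ [a]) ++ [a + (f.length : Int)] := by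
      simp [pvSumStep, List.getLast!_eq_getLast?_getD, List.getLast?_concat]
    rw [hstep, ih (acc ++ [a]) (a + (f.length : Int))]
    simp [pvPS]

lemma pvFwd_cons_none (c : Char) (t : List Char) (i : Int) :
    pvFwd (c :: t) i none
      = (if (c = 'K' ∨ c = 'R') ∧ t.head? ≠ some 'P' then [i + 1] else [])
        ++ pvFwd t (i + 1) none := by
  cases t <;> rfl

lemma pvPS_of_F (cs : List Char) :
    ∀ (x : List Char) (a : Int),
    pvPS a ((pvF x cs).map (fun f => (f.length : Int)))
      = pvFwd cs (a + (x.length : Int)) none ++ [a + (x.length : Int) + (cs.length : Int)] := by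
  induction cs with
  | nil => intro x a; simp [pvF, pvPS, pvFwd]
  | cons c t ih =>
    intro x a
    rw [pvFwd_cons_none]
    by_cases hcond : (c = 'K' ∨ c = 'R') ∧ t.head? ≠ some 'P'
    · rw [pvF_cons, if_pos hcond, List.map_cons]
      simp only [pvPS]
      rw [ih [] (a + (((x ++ [c]).length : Nat) : Int))]
      rw [if_pos hcond]
      simp only [List.length_nil, Nat.cast_zero, add_zero, List.length_append,
        List.length_cons, Nat.cast_add, Nat.cast_one, List.cons_append, List.nil_append]
      push_cast
      ring_nf
    · rw [pvF_cons, if_neg hcond]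
      rw [ih (x ++ [c]) a]
      rw [if_neg hcond]
      simp only [List.length_append, List.length_cons, List.length_nil, Nat.cast_add,
        Nat.cast_one, List.nil_append]
      push_cast
      ring_nf

-- last! equals getLast for nonempty lists (bridge used twice below)
lemma getLast!_split (F : List (List Char)) (h : F ≠ []) :
    F.dropLast ++ [F.getLast!] = F := by
  have h1 := List.dropLast_concat_getLast h
  have h2 : F.getLast h = F.getLast! := by
    simp [List.getLast!_eq_getLast?_getD, List.getLast?_eq_some_getLast h]
  rw [← h2]; exact h1

-- ===== VERDICT (by name: the statement is the Claim_ definition above) =====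
theorem trypsin_cleavage_sites_py_spec : Claim_equal_trypsin_cleavage_sites_py := by
  intro s hdom
  have hnc : ∀ c ∈ s.toList, c ≠ pvCut := by
    intro c hc heq
    have hall : pvDomChar c = true := by
      have hd : s.toList.all pvDomChar = true := hdom
      exact List.all_eq_true.mp hd c hc
    rw [heq] at hall
    exact absurd hall (by decide)
  -- A's loop value
  have hA := loopA s.toList s.toList [] rfl [0]
  simp only [List.length_nil, Nat.cast_zero, List.nil_append] at hA
  -- B's raw fragments
  have hraw : PySem.Chars.splitOn
      (PySem.Chars.replace (PySem.Chars.replace s.toList ['K'] ['K', pvCut]) ['R'] ['R', pvCut])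
      [pvCut] = pvRaw s.toList := by
    rw [marked_eq, splitOn_single, splitC_marked _ hnc]
  -- B's merge loop
  have hF : ((pvRaw s.toList).drop 1).foldl pvMergeStep [(pvRaw s.toList).headI]
      = pvF [] s.toList := by
    rw [List.drop_one]
    have h1 := foldl_mergeStep (pvRaw s.toList).tail [] (pvRaw s.toList).headI
    simp only [List.nil_append] at h1
    rw [h1]
    have h2 := mergeRec_raw s.toList []
    simpa using h2
  -- B's prefix sums of all fragments
  have hPS0 : pvPS 0 ((pvF [] s.toList).map (fun f => (f.length : Int)))
      = pvFwd s.toList 0 none ++ [(s.toList.length : Int)] := by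
    have := pvPS_of_F s.toList [] 0
    simpa using this
  simp only [Spec_trypsin_cleavage_sites_py, trypsin_cleavage_sites_py,
    trypsin_cleavage_sites_py_alt]
  rw [hA, hraw, hF]
  set V := pvFwd s.toList 0 none with hV
  set n : Int := (s.toList.length : Int) with hn
  have hne := pvF_ne_nil [] s.toList
  by_cases hlast : (pvF [] s.toList).getLast! = []
  · -- trailing empty fragment: it is popped; A appends nothing
    have hsplit := getLast!_split _ hne
    rw [hlast] at hsplit
    set G := (pvF [] s.toList).dropLast with hG
    have hmap : (pvF [] s.toList).map (fun f => (f.length : Int))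
        = G.map (fun f => (f.length : Int)) ++ [0] := by
      conv_lhs => rw [← hsplit]
      simp
    rw [hmap, pvPS_append] at hPS0
    simp only [pvPS, add_zero] at hPS0
    obtain ⟨hVeq, hsum⟩ := List.append_inj' hPS0 (by simp)
    have hsum' : (G.map (fun f => (f.length : Int))).sum = n := by
      simpa using hsum
    rw [if_pos hlast]
    have hBval : G.foldl pvSumStep [0] = [0] ++ pvPS 0 (G.map (fun f => (f.length : Int))) := by
      have := foldl_sumStep G [] 0
      simpa using this
    rw [hBval, hVeq]
    -- A's trailing check is false: the last entry of [0] ++ V is already n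
    rcases List.eq_nil_or_concat V with hVn | ⟨V', v, hVc⟩
    · have hGn : G.map (fun f => (f.length : Int)) = [] := by
        rw [hVn] at hVeq
        exact (pvPS_eq_nil_iff _ _).mp hVeq
      rw [hGn] at hsum'
      simp only [List.sum_nil] at hsum'
      rw [hVn]
      rw [if_neg (by simp [List.getLast!_eq_getLast?_getD, ← hsum'])]
    · have hGne : G.map (fun f => (f.length : Int)) ≠ [] := by
        intro h
        rw [h] at hVeq
        simp [pvPS, hVc] at hVeq
      have hv : v = n := by
        have hlst := pvPS_getLast? (G.map (fun f => (f.length : Int))) 0 hGne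
        rw [hVeq, hVc, List.concat_eq_append, List.getLast?_concat] at hlst
        simp only [Option.some.injEq] at hlst
        rw [hlst, zero_add, hsum']
      have hlastA : ([(0 : Int)] ++ V).getLast! = n := by
        rw [hVc, List.concat_eq_append,
          show [(0 : Int)] ++ (V' ++ [v]) = ([0] ++ V') ++ [v] from (List.append_assoc _ _ _).symm,
          List.getLast!_eq_getLast?_getD, List.getLast?_concat]
        simpa using hv
      rw [if_neg (by simpa using hlastA)]
  · -- last fragment nonempty: nothing is popped; A appends n
    have hsplit := getLast!_split _ hne
    set f := (pvF [] s.toList).getLast! with hf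
    set G := (pvF [] s.toList).dropLast with hG
    have hmap : (pvF [] s.toList).map (fun g => (g.length : Int))
        = G.map (fun g => (g.length : Int)) ++ [(f.length : Int)] := by
      conv_lhs => rw [← hsplit]
      simp
    have hPS1 := hPS0
    rw [hmap, pvPS_append] at hPS1
    simp only [pvPS] at hPS1
    obtain ⟨hVeq, hsum⟩ := List.append_inj' hPS1 (by simp)
    have hsum' : (G.map (fun g => (g.length : Int))).sum + (f.length : Int) = n := by
      have h0 : (0 : Int) + (G.map (fun g => (g.length : Int))).sum + (f.length : Int) = n := by
        simpa using hsum
      omega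
    have hflen : (1 : Int) ≤ (f.length : Int) := by
      have h1 : f ≠ [] := hlast
      have h2 : 0 < f.length := List.length_pos_of_ne_nil h1
      omega
    rw [if_neg hlast]
    have hBval : (pvF [] s.toList).foldl pvSumStep [0]
        = [0] ++ pvPS 0 ((pvF [] s.toList).map (fun g => (g.length : Int))) := by
      have := foldl_sumStep (pvF [] s.toList) [] 0
      simpa using this
    rw [hBval, hPS0]
    -- A's trailing check fires: the last entry of [0] ++ V is n - |f| ≠ n
    have hlastA : ([(0 : Int)] ++ V).getLast! ≠ n := by
      rcases List.eq_nil_or_concat V with hVn | ⟨V', v, hVc⟩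
      · have hGn : G.map (fun g => (g.length : Int)) = [] := by
          rw [hVn] at hVeq
          exact (pvPS_eq_nil_iff _ _).mp hVeq
        rw [hGn] at hsum'
        simp only [List.sum_nil, zero_add] at hsum'
        rw [hVn]
        simp only [List.append_nil, List.getLast!_eq_getLast?_getD]
        simp only [List.getLast?_singleton, Option.getD_some]
        omega
      · have hGne : G.map (fun g => (g.length : Int)) ≠ [] := by
          intro h
          rw [h] at hVeq
          simp [pvPS, hVc] at hVeq
        have hv : v = n - (f.length : Int) := by
          have hlst := pvPS_getLast? (G.map (fun g => (g.length : Int))) 0 hGne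
          rw [hVeq, hVc, List.concat_eq_append, List.getLast?_concat] at hlst
          simp only [Option.some.injEq] at hlst
          omega
        rw [hVc]
        simp only [List.concat_eq_append, ← List.append_assoc, List.getLast!_eq_getLast?_getD,
          List.getLast?_concat, Option.getD_some]
        omega
    rw [if_pos (by simpa using hlastA)]
    simp [List.append_assoc]
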